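-- pv_equiv track=rewrite | github.com/Tomer-Shahar/Puzzle_Solver | file_parser.py | crop_bottom
-- ===== SOURCE A (Python) =====
-- def crop_bottom(uncropped_list):
--     cropped_list = []
--     idx_list = list(enumerate(uncropped_list))  # add indices
--
--     for idx, row in reversed(idx_list):  # cut rows from bottom by beginnings at last row
--         if 1 in row:  # The beginning of a piece
--             cropped_list = uncropped_list[:idx + 1]
--             break
--
--     return cropped_list
-- ===== SOURCE B (Python) =====
-- def crop_bottom(uncropped_list):
--     last = -1
--     for idx, row in enumerate(uncropped_list):
--         if 1 in row:
--             last = idx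
--     return uncropped_list[:last + 1]
-- ===== Notes on version B (the rewrite author's own statement) =====
-- stated objective: alternative
-- what changed: Forward single pass recording the max index of a row containing 1 and slicing once at the end, instead of A's reversed enumerate with early break and slice inside the loop.
import Mathlib
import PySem

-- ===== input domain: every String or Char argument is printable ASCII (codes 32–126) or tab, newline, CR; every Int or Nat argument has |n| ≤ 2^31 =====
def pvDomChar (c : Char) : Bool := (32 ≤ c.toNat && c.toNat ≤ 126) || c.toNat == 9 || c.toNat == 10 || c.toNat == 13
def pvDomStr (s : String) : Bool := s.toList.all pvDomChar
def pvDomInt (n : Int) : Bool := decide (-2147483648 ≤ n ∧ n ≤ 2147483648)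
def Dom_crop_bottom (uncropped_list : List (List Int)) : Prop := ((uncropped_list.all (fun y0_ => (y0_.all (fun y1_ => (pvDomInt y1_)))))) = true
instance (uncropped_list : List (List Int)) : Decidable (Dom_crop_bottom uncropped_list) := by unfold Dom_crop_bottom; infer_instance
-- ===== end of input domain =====

-- B: forward single pass recording the last index of a row containing 1, then one slice; same cost, different decomposition from A's reversed scan with break.
-- ===== PORT A =====
-- the 'for idx, row in reversed(idx_list): if 1 in row: … break' loop
def cropLoopA (uncropped_list : List (List Int)) : List (Int × List Int) → List (List Int)
  | [] => []                                   -- loop exhausted: cropped_list stays []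
  | (idx, row) :: rest =>
      if (1 : Int) ∈ row then PySem.List.slice uncropped_list none (some (idx + 1))
      else cropLoopA uncropped_list rest

def crop_bottom (uncropped_list : List (List Int)) : List (List Int) :=
  let idx_list := PySem.List.enumerate uncropped_list 0
  cropLoopA uncropped_list idx_list.reverse

-- ===== PORT B =====
def crop_bottom_alt (uncropped_list : List (List Int)) : List (List Int) :=
  let last := (PySem.List.enumerate uncropped_list 0).foldl
      (fun acc p => if (1 : Int) ∈ p.2 then p.1 else acc) (-1)
  PySem.List.slice uncropped_list none (some (last + 1))

-- ===== PRECONDITION & SPEC =====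
def Spec_crop_bottom (uncropped_list : List (List Int)) (out : List (List Int)) : Prop := out = crop_bottom_alt uncropped_list
instance (uncropped_list : List (List Int)) (out : List (List Int)) : Decidable (Spec_crop_bottom uncropped_list out) := by unfold Spec_crop_bottom; infer_instance

-- ===== CLAIM (what is proved, stated in full; the proofs are below) =====
def Claim_equal_crop_bottom : Prop := ∀ (uncropped_list : List (List Int)), Dom_crop_bottom uncropped_list → Spec_crop_bottom uncropped_list (crop_bottom uncropped_list)

-- ===== LEMMAS AND PROOFS =====
-- B's fold computes the index of the LAST matching row: the first match of the reversed list.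
lemma foldl_last (l : List (Int × List Int)) (acc : Int) :
    l.foldl (fun acc p => if (1 : Int) ∈ p.2 then p.1 else acc) acc =
      match l.reverse.find? (fun p => decide ((1 : Int) ∈ p.2)) with
      | some q => q.1
      | none => acc := by
  induction l generalizing acc with
  | nil => simp
  | cons x t ih =>
      simp only [List.foldl_cons, ih, List.reverse_cons, List.find?_append]
      cases t.reverse.find? (fun p => decide ((1 : Int) ∈ p.2)) with
      | some q => simp
      | none =>
          simp only [Option.none_or, List.find?_cons, List.find?_nil]
          by_cases h : (1 : Int) ∈ x.2 <;> simp [h]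

-- A's loop returns the slice at the first match, [] if none.
lemma cropLoopA_find (xs : List (List Int)) (l : List (Int × List Int)) :
    cropLoopA xs l =
      match l.find? (fun p => decide ((1 : Int) ∈ p.2)) with
      | some q => PySem.List.slice xs none (some (q.1 + 1))
      | none => [] := by
  induction l with
  | nil => simp [cropLoopA]
  | cons x t ih =>
      simp only [cropLoopA, List.find?_cons]
      by_cases h : (1 : Int) ∈ x.2 <;> simp [h, ih]

-- ===== VERDICT (by name: the statement is the Claim_ definition above) =====
theorem crop_bottom_spec : Claim_equal_crop_bottom := by
  intro xs _
  unfold Spec_crop_bottom crop_bottom crop_bottom_alt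
  rw [cropLoopA_find, foldl_last]
  cases (PySem.List.enumerate xs 0).reverse.find? (fun p => decide ((1 : Int) ∈ p.2)) with
  | some q => simp
  | none => simp [PySem.List.slice_to xs (b := 0) (by omega)]
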